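-- pv_equiv track=rewrite | github.com/AlistairMcCutcheon/FIT5217 | assignment2.py | remove_successive_chars
-- ===== SOURCE A (Python) =====
-- def remove_successive_chars(s: str, chars_to_keep_unchanged: set[str]):
--     previous_char = None
--     new_string = []
--     for char in s:
--         if char in chars_to_keep_unchanged:
--             new_string.append(char)
--             previous_char = char
--             continue
--         if char == previous_char:
--             continue
--         new_string.append(char)
--         previous_char = char
--     return "".join(new_string)
-- ===== SOURCE B (Python) =====
-- def remove_successive_chars(s: str, chars_to_keep_unchanged: set[str]):
--     out = []
--     i = 0
--     n = len(s)
--     while i < n: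
--         c = s[i]
--         j = i + 1
--         while j < n and s[j] == c:
--             j += 1
--         # one maximal run s[i:j] of the character c: keep it whole or collapse to one
--         out.append(s[i:j] if c in chars_to_keep_unchanged else c)
--         i = j
--     return "".join(out)
-- ===== Notes on version B (the rewrite author's own statement) =====
-- stated objective: alternative
-- what changed: B first delimits each maximal run of equal characters and then makes one keep-whole-run / emit-one decision per run, instead of A's per-character loop threading a previous_char state.
import Mathlib
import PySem

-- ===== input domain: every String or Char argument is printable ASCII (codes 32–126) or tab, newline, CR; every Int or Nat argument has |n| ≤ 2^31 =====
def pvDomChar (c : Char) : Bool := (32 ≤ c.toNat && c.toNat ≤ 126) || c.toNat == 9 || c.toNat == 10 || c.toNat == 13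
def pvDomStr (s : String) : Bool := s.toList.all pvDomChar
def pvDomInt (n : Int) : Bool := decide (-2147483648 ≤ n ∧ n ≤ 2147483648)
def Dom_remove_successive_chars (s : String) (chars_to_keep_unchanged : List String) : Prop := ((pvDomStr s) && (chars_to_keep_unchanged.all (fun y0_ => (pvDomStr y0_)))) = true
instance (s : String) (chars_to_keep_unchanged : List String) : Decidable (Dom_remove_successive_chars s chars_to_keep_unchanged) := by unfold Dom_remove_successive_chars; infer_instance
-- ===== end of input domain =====

-- B delimits each maximal run of equal characters and decides once per run (keep whole run / emit one char),
-- instead of A's per-character loop threading previous_char state; objective: alternative (same O(n) cost).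

-- ===== PORT A =====
-- literal transliteration: for-loop = foldl over (new_string, previous_char)
def remove_successive_chars (s : String) (chars_to_keep_unchanged : List String) : String :=
  String.ofList (s.toList.foldl (fun (st : List Char × Option Char) char =>
    if chars_to_keep_unchanged.contains (String.ofList [char]) then (st.1 ++ [char], some char)
    else if some char = st.2 then st
    else (st.1 ++ [char], some char)) ([], none)).1

-- ===== PORT B =====
-- Source B's outer while-loop: take the maximal run of the head character, decide once, recurse on the rest
def pvRunLoop (chars_to_keep_unchanged : List String) : List Char → List Char
  | [] => []
  | c :: rest =>
      (if chars_to_keep_unchanged.contains (String.ofList [c]) then c :: rest.takeWhile (· == c) else [c])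
        ++ pvRunLoop chars_to_keep_unchanged (rest.dropWhile (· == c))
termination_by l => l.length
decreasing_by
  simpa using Nat.lt_succ_of_le (List.length_dropWhile_le (· == c) rest)

def remove_successive_chars_alt (s : String) (chars_to_keep_unchanged : List String) : String :=
  String.ofList (pvRunLoop chars_to_keep_unchanged s.toList)

-- ===== PRECONDITION & SPEC =====
def Spec_remove_successive_chars (s : String) (chars_to_keep_unchanged : List String) (out : String) : Prop := out = remove_successive_chars_alt s chars_to_keep_unchanged
instance (s : String) (chars_to_keep_unchanged : List String) (out : String) : Decidable (Spec_remove_successive_chars s chars_to_keep_unchanged out) := by unfold Spec_remove_successive_chars; infer_instance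

-- ===== CLAIM (what is proved, stated in full; the proofs are below) =====
def Claim_equal_remove_successive_chars : Prop := ∀ (s : String) (chars_to_keep_unchanged : List String), Dom_remove_successive_chars s chars_to_keep_unchanged → Spec_remove_successive_chars s chars_to_keep_unchanged (remove_successive_chars s chars_to_keep_unchanged)

-- ===== LEMMAS AND PROOFS =====

-- recursive characterisation of A's loop result (state-free)
def pvG (keep : List String) : Option Char → List Char → List Char
  | _, [] => []
  | prev, c :: rest =>
      if keep.contains (String.ofList [c]) then c :: pvG keep (some c) rest
      else if some c = prev then pvG keep prev rest
      else c :: pvG keep (some c) rest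

theorem pvFoldl_eq_pvG (keep : List String) (cs : List Char) :
    ∀ (acc : List Char) (prev : Option Char),
      (cs.foldl (fun (st : List Char × Option Char) char =>
        if keep.contains (String.ofList [char]) then (st.1 ++ [char], some char)
        else if some char = st.2 then st
        else (st.1 ++ [char], some char)) (acc, prev)).1 = acc ++ pvG keep prev cs := by
  induction cs with
  | nil => intro acc prev; simp [pvG]
  | cons c rest ih =>
      intro acc prev
      simp only [List.foldl_cons, pvG]
      split_ifs with h1 h2 <;> rw [ih] <;> simp

theorem pvG_run (keep : List String) (c : Char) (rest : List Char) :
    pvG keep (some c) rest =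
      (if keep.contains (String.ofList [c]) then rest.takeWhile (· == c) else [])
        ++ pvG keep (some c) (rest.dropWhile (· == c)) := by
  induction rest with
  | nil => simp [List.takeWhile, List.dropWhile]
  | cons d t ih =>
      by_cases hd : d = c
      · subst hd
        simp only [List.takeWhile_cons, List.dropWhile_cons, beq_self_eq_true, if_pos]
        simp only [pvG]
        split_ifs with hk <;> simp_all
      · have hne : (d == c) = false := by simp [hd]
        simp [hne]

theorem pvG_headNe (keep : List String) (c d : Char) (rest : List Char) (h : d ≠ c) :
    pvG keep (some c) (d :: rest) = pvG keep none (d :: rest) := by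
  simp only [pvG]
  have : ¬ (some d = some c) := by simp [h]
  split_ifs with h1 h2 <;> simp_all

theorem pvDropWhile_head (p : Char → Bool) (l : List Char) :
    ∀ d t, l.dropWhile p = d :: t → p d = false := by
  induction l with
  | nil => intro d t h; simp [List.dropWhile] at h
  | cons x xs ih =>
      intro d t h
      by_cases hx : p x = true
      · rw [List.dropWhile_cons, if_pos hx] at h; exact ih d t h
      · rw [List.dropWhile_cons, if_neg hx] at h
        cases h; simpa using hx

theorem pvG_none_eq_runLoop (keep : List String) :
    ∀ cs : List Char, pvG keep none cs = pvRunLoop keep cs := by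
  intro cs
  induction hn : cs.length using Nat.strong_induction_on generalizing cs with
  | _ n ih =>
    cases cs with
    | nil => simp [pvG, pvRunLoop]
    | cons c rest =>
      have hstep : pvG keep none (c :: rest) = c :: pvG keep (some c) rest := by
        simp only [pvG]; split_ifs <;> simp_all
      rw [hstep, pvG_run, pvRunLoop]
      have htail : pvG keep (some c) (rest.dropWhile (· == c))
          = pvRunLoop keep (rest.dropWhile (· == c)) := by
        have hlen : (rest.dropWhile (· == c)).length < n := by
          have h1 := List.length_dropWhile_le (· == c) rest
          have h2 : rest.length + 1 = n := by simpa using hn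
          omega
        cases hdw : rest.dropWhile (· == c) with
        | nil => simp [pvG, pvRunLoop]
        | cons d t =>
            have hd : (d == c) = false := pvDropWhile_head _ rest d t hdw
            have hdc : d ≠ c := by simpa using hd
            rw [pvG_headNe keep c d t hdc]
            exact ih _ (by rw [← hdw]; exact hlen) _ rfl
      rw [htail]
      split_ifs with h <;> simp

-- ===== VERDICT (by name: the statement is the Claim_ definition above) =====
theorem remove_successive_chars_spec : Claim_equal_remove_successive_chars := by
  intro s keep _
  unfold Spec_remove_successive_chars remove_successive_chars remove_successive_chars_alt
  rw [pvFoldl_eq_pvG keep s.toList [] none, pvG_none_eq_runLoop]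
  simp
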